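-- pv_equiv track=rewrite | github.com/Cecilia520/algorithmic-learning-leetcode | cecilia-python/company-title/jingdong/FindMaxSubTree.py | findMinTimeForTree
-- ===== SOURCE A (Python) =====
-- def findMinTimeForTree(matrix, n):
--     """
--     计算最短疏散时间，转化成找每个子树的最大节点数
--     :param matrix:树对应的邻接矩阵
--     :param n 树的节点数目
--     :return:
--     """
--
--     visit = [0] * n  # 记录每个节点是否被访问的数组
--     max_time = 0
--     visit[0] = 1
--
--     for u in matrix[0]:
--         visit[u] = 1
--         queue = [u]
--         tmp = 0
--         while len(queue) != 0:
--             tmp += 1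
--             v = queue.pop()
--             for i in matrix[v]:
--                 if visit[i] == 0:
--                     visit[i] = 1
--                     queue.append(i)
--         max_time = max(tmp, max_time)
--     return max_time
-- ===== SOURCE B (Python) =====
-- def findMinTimeForTree(matrix, n):
--     # Fixed-point label propagation: no queue/stack/frontier at all.  Each
--     # child phase marks u and then repeatedly sweeps the whole visit array,
--     # marking any unvisited neighbour of an already-marked node (node 0
--     # excluded: the root's row drives only the outer loop), until a full
--     # sweep changes nothing; the subtree size is read off as a difference
--     # of visit.count(0).
--     visit = [0] * n
--     visit[0] = 1
--     best = 0
--     for u in matrix[0]: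
--         visit[u] = 1
--         before = visit.count(0)
--         changed = True
--         while changed:
--             changed = False
--             for v in range(1, n):
--                 if visit[v] == 1:
--                     for w in matrix[v]:
--                         if visit[w] == 0:
--                             visit[w] = 1
--                             changed = True
--         best = max(best, 1 + before - visit.count(0))
--     return best
-- ===== Notes on version B (the rewrite author's own statement) =====
-- stated objective: alternative
-- what changed: Replaces the queue-based flood fill entirely by fixed-point label propagation: each phase repeatedly sweeps the whole visit array marking unvisited neighbours of marked nodes until a sweep changes nothing, and the subtree size is read off as a difference of visit.count(0) instead of counting pops.
-- outside the precondition, e.g. on findMinTimeForTree([[0, 1], []], 2): A returns 2, B returns 1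
import Mathlib
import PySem

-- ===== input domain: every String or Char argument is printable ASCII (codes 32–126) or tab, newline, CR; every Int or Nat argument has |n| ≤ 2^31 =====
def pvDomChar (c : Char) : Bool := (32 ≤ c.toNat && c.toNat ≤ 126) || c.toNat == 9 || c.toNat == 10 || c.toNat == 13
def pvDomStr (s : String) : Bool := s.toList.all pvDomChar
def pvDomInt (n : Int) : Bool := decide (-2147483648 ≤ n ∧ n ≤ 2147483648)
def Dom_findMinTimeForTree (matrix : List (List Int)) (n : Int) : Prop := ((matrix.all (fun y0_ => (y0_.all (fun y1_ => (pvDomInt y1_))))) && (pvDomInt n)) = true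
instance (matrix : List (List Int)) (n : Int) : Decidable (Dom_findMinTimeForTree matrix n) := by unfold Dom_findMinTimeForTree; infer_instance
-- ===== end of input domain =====

-- B replaces A's queue-based flood fill by fixed-point label propagation: repeated
-- full sweeps of the visit array until a sweep changes nothing, the subtree size read
-- off as a difference of visit.count(0) (objective: alternative; equivalence of the
-- return value — A mutates no argument).

-- ===== PORT A =====
-- shared low-level Python-indexing helpers (both sources use visit[i] / visit[i] = 1)
-- visit[i]: the default 1 is only reached where Python raises IndexError (outside Pre_)
def pvGet (vis : List Int) (i : Int) : Int := PySem.List.pyGetD vis i 1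
-- visit[i] = 1: a no-op only where Python raises IndexError (outside Pre_)
def pvMark (vis : List Int) (i : Int) : List Int := PySem.List.pySetD vis i 1
-- A's inner scan: 'for i in matrix[v]: if visit[i] == 0: visit[i] = 1; queue.append(i)'
def markScan (vis acc row : List Int) : List Int × List Int :=
  row.foldl (fun s i => if pvGet s.1 i == 0 then (pvMark s.1 i, s.2 ++ [i]) else s) (vis, acc)

-- number of unvisited slots: the termination measure of both versions' loops
def pvCZ (vis : List Int) : Nat := vis.countP (fun x => x == 0)

-- (termination lemmas, cited by the ports' decreasing_by)
theorem pvCZ_set (vis : List Int) (j : Nat) (h : vis[j]? = some 0) :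
    pvCZ (vis.set j 1) + 1 = pvCZ vis := by
  induction vis generalizing j with
  | nil => simp at h
  | cons x xs ih =>
    cases j with
    | zero => simp_all [pvCZ]
    | succ k =>
      simp only [List.getElem?_cons_succ] at h
      have := ih k h
      simp only [List.set_cons_succ, pvCZ, List.countP_cons] at *
      omega

theorem pvGet_zero_norm (vis : List Int) (i : Int) (h : pvGet vis i = 0) :
    ∃ j : Nat, vis[j]? = some 0 ∧ pvMark vis i = vis.set j 1 := by
  unfold pvGet PySem.List.pyGetD PySem.List.pyGet? at h
  unfold pvMark PySem.List.pySetD PySem.List.pySet?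
  cases hidx : PySem.List.pyIdx? vis.length i with
  | none => rw [hidx] at h; simp at h
  | some j =>
    rw [hidx] at h
    simp only [Option.bind_some] at h
    cases hv : vis[j]? with
    | none => rw [hv] at h; simp at h
    | some a =>
      rw [hv] at h; simp at h; subst h
      exact ⟨j, hv, by simp⟩

theorem markScan_measure : ∀ (row vis acc : List Int),
    pvCZ (markScan vis acc row).1 + (markScan vis acc row).2.length = pvCZ vis + acc.length := by
  intro row
  induction row with
  | nil => intro vis acc; simp [markScan]
  | cons i row ih =>
    intro vis acc
    simp only [markScan, List.foldl_cons]
    by_cases hc : pvGet vis i == 0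
    · simp only [hc, if_pos]
      have h0 : pvGet vis i = 0 := by simpa using hc
      obtain ⟨j, hj, hset⟩ := pvGet_zero_norm vis i h0
      have := ih (pvMark vis i) (acc ++ [i])
      simp only [markScan] at this
      rw [this, hset, List.length_append]
      have := pvCZ_set vis j hj
      simp; omega
    · simp only [hc, if_neg, Bool.false_eq_true, not_false_iff]
      have := ih vis acc
      simp only [markScan] at this
      simpa using this

def whileA (matrix : List (List Int)) (vis queue : List Int) : Int × List Int :=
  -- while len(queue) != 0: tmp += 1; v = queue.pop(); for i in matrix[v]: …append
  if h : queue = [] then (0, vis)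
  else
    let v := queue.getLast h
    let p := markScan vis queue.dropLast ((PySem.List.pyGet? matrix v).getD [])
    let r := whileA matrix p.1 p.2
    (r.1 + 1, r.2)
termination_by pvCZ vis + queue.length
decreasing_by
  have hm := markScan_measure ((PySem.List.pyGet? matrix (queue.getLast h)).getD []) vis queue.dropLast
  have h1 : queue.dropLast.length = queue.length - 1 := List.length_dropLast
  have h2 : queue.length ≠ 0 := by simpa using h
  omega

def findMinTimeForTree (matrix : List (List Int)) (n : Int) : Int :=
  let visit := pvMark (List.replicate n.toNat 0) 0
  let st := ((PySem.List.pyGet? matrix 0).getD []).foldl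
      (fun (st : List Int × Int) u =>
        let vis1 := pvMark st.1 u
        let r := whileA matrix vis1 [u]
        (r.2, max r.1 st.2)) (visit, 0)
  st.2

-- ===== PORT B =====
-- matrix[v] (the default [] is only reached where Python raises IndexError, outside Pre_)
def pvAdjI (matrix : List (List Int)) (v : Int) : List Int := (PySem.List.pyGet? matrix v).getD []

-- 'for w in matrix[v]: if visit[w] == 0: visit[w] = 1; changed = True'
def sweepRow (vis : List Int) (chg : Bool) (row : List Int) : List Int × Bool :=
  row.foldl (fun s w => if pvGet s.1 w == 0 then (pvMark s.1 w, true) else s) (vis, chg)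

-- one full sweep: 'changed = False; for v in range(1, n): if visit[v] == 1: …'
def sweepOnce (matrix : List (List Int)) (n : Int) (vis : List Int) : List Int × Bool :=
  (PySem.List.pyRange 1 n 1).foldl
    (fun s v => if pvGet s.1 v == 1 then sweepRow s.1 s.2 (pvAdjI matrix v) else s) (vis, false)

-- (termination lemmas for the while-changed loop, cited by its decreasing_by)
theorem sweepRow_measure : ∀ (row vis : List Int) (chg : Bool),
    pvCZ (sweepRow vis chg row).1 ≤ pvCZ vis ∧
      ((sweepRow vis chg row).2 = true → chg = true ∨ pvCZ (sweepRow vis chg row).1 < pvCZ vis) := by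
  intro row
  induction row with
  | nil => intro vis chg; simp [sweepRow]
  | cons w row ih =>
    intro vis chg
    have hstep : sweepRow vis chg (w :: row) =
        if pvGet vis w == 0 then sweepRow (pvMark vis w) true row else sweepRow vis chg row := by
      simp only [sweepRow, List.foldl_cons]
      by_cases hc : pvGet vis w == 0 <;> simp [hc]
    rw [hstep]
    by_cases hc : pvGet vis w == 0
    · rw [if_pos hc]
      have h0 : pvGet vis w = 0 := by simpa using hc
      obtain ⟨j, hj, hset⟩ := pvGet_zero_norm vis w h0
      have hlt : pvCZ (pvMark vis w) < pvCZ vis := by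
        have := pvCZ_set vis j hj; rw [hset]; omega
      obtain ⟨h1, _⟩ := ih (pvMark vis w) true
      exact ⟨by omega, fun _ => Or.inr (by omega)⟩
    · rw [if_neg hc]; exact ih vis chg

theorem sweepOnce_fold_measure (matrix : List (List Int)) :
    ∀ (l : List Int) (st : List Int × Bool) (B : Nat), pvCZ st.1 ≤ B → (st.2 = true → pvCZ st.1 < B) →
    pvCZ (l.foldl (fun s v => if pvGet s.1 v == 1 then sweepRow s.1 s.2 (pvAdjI matrix v) else s) st).1 ≤ B ∧
      ((l.foldl (fun s v => if pvGet s.1 v == 1 then sweepRow s.1 s.2 (pvAdjI matrix v) else s) st).2 = true →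
        pvCZ (l.foldl (fun s v => if pvGet s.1 v == 1 then sweepRow s.1 s.2 (pvAdjI matrix v) else s) st).1 < B) := by
  intro l
  induction l with
  | nil => intro st B h1 h2; exact ⟨h1, h2⟩
  | cons v l ih =>
    intro st B h1 h2
    simp only [List.foldl_cons]
    by_cases hc : pvGet st.1 v == 1
    · rw [if_pos hc]
      obtain ⟨g1, g2⟩ := sweepRow_measure (pvAdjI matrix v) st.1 st.2
      refine ih _ B (by omega) ?_
      intro hf
      rcases g2 hf with hch | hlt
      · have := h2 hch; omega
      · omega
    · rw [if_neg hc]; exact ih st B h1 h2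

theorem sweepOnce_measure (matrix : List (List Int)) (n : Int) (vis : List Int) :
    pvCZ (sweepOnce matrix n vis).1 ≤ pvCZ vis ∧
      ((sweepOnce matrix n vis).2 = true → pvCZ (sweepOnce matrix n vis).1 < pvCZ vis) := by
  exact sweepOnce_fold_measure matrix (PySem.List.pyRange 1 n 1) (vis, false) (pvCZ vis)
    le_rfl (by simp)

def sweepLoop (matrix : List (List Int)) (n : Int) (vis : List Int) : List Int :=
  -- while changed: changed = False; <one full sweep>
  let s := sweepOnce matrix n vis
  if h : s.2 = true then sweepLoop matrix n s.1 else s.1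
termination_by pvCZ vis
decreasing_by exact (sweepOnce_measure matrix n vis).2 h

def findMinTimeForTree_alt (matrix : List (List Int)) (n : Int) : Int :=
  let visit := pvMark (List.replicate n.toNat 0) 0
  let st := (pvAdjI matrix 0).foldl
      (fun (st : List Int × Int) u =>
        let vis1 := pvMark st.1 u
        let before := PySem.List.count vis1 0
        let vis2 := sweepLoop matrix n vis1
        (vis2, max st.2 (1 + before - PySem.List.count vis2 0))) (visit, 0)
  st.2

-- ===== PRECONDITION & SPEC =====
-- the set of nodes reachable from node 0 along in-range adjacency entries (a graph
-- property of the input, computed as an iterated-image closure — not the ports' loop)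
def pvStep (matrix : List (List Int)) (n : Int) (S : Finset Nat) : Finset Nat :=
  S ∪ S.biUnion (fun j => ((matrix.getD j []).filterMap
    (fun e => if 0 ≤ e ∧ e < n ∧ e < (matrix.length : Int) then some e.toNat else none)).toFinset)
def pvReachSet (matrix : List (List Int)) (n : Int) : Finset Nat :=
  (pvStep matrix n)^[matrix.length] {0}
-- Pre_ is the natural adjacency-list domain: A raises IndexError when n ≤ 0, the matrix is
-- empty, or a row reachable from node 0 has an entry outside [0, n) or [0, len(matrix));
-- rows the traversal cannot reach are unconstrained.  Two kinds of inputs on which A still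
-- returns are excluded as accidents of A's traversal (see cites): negative entries of
-- reachable rows (Python wraps them, visit modulo n but matrix modulo len(matrix), so the
-- value depends on accidental aliasing), and a root self-entry 0 in matrix[0] (the root is
-- listed as its own child, and A then re-scans the root row in the middle of its loop).
def Pre_findMinTimeForTree (matrix : List (List Int)) (n : Int) : Prop :=
  0 < n ∧ 0 < (matrix.length : Int) ∧ (0 : Int) ∉ matrix.getD 0 [] ∧
    ∀ j ∈ pvReachSet matrix n, ∀ e ∈ matrix.getD j [], 0 ≤ e ∧ e < n ∧ e < (matrix.length : Int)
instance (matrix : List (List Int)) (n : Int) : Decidable (Pre_findMinTimeForTree matrix n) := by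
  unfold Pre_findMinTimeForTree; infer_instance
def pvWitness_findMinTimeForTree : List (List Int) × Int := ([[1, 2], [0], [0]], 3)

def Spec_findMinTimeForTree (matrix : List (List Int)) (n : Int) (out : Int) : Prop := out = findMinTimeForTree_alt matrix n
instance (matrix : List (List Int)) (n : Int) (out : Int) : Decidable (Spec_findMinTimeForTree matrix n out) := by unfold Spec_findMinTimeForTree; infer_instance

-- ===== CLAIM (what is proved, stated in full; the proofs are below) =====
def Claim_equal_findMinTimeForTree : Prop := ∀ (matrix : List (List Int)) (n : Int), Dom_findMinTimeForTree matrix n → Pre_findMinTimeForTree matrix n → Spec_findMinTimeForTree matrix n (findMinTimeForTree matrix n)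

-- ===== LEMMAS AND PROOFS =====

-- node j is marked in visit
def pvMk (vis : List Int) (j : Nat) : Prop := vis.getD j 1 ≠ 0
-- adjacency row of node j
def pvAdj (matrix : List (List Int)) (j : Nat) : List Int := matrix.getD j []
-- well-formed input (the bounds part of Pre_ at the Nat level)
def pvWF (matrix : List (List Int)) (n : Nat) : Prop :=
  0 < n ∧ 0 < matrix.length ∧
    ∀ j ∈ pvReachSet matrix (n : Int), ∀ e ∈ matrix.getD j [],
      0 ≤ e ∧ e < (n : Int) ∧ e < (matrix.length : Int)
theorem pvStep_subset (matrix : List (List Int)) (n : Int) (S : Finset Nat) :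
    S ⊆ pvStep matrix n S := Finset.subset_union_left

theorem pvReachSet_zero_mem (matrix : List (List Int)) (n : Int) :
    0 ∈ pvReachSet matrix n := by
  unfold pvReachSet
  induction matrix.length with
  | zero => simp
  | succ k ih =>
    rw [Function.iterate_succ_apply']
    exact pvStep_subset matrix n _ ih

theorem pvReachSet_fix (matrix : List (List Int)) (n : Int) :
    pvStep matrix n (pvReachSet matrix n) = pvReachSet matrix n := by
  by_cases hlen : matrix = []
  · subst hlen
    unfold pvStep
    refine Finset.union_eq_left.2 (Finset.biUnion_subset.2 fun j _ => ?_)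
    intro x hx
    rw [List.mem_toFinset, List.mem_filterMap] at hx
    obtain ⟨e, he, _⟩ := hx
    simp at he
  have hlen0 : 0 < matrix.length := List.length_pos_iff.2 hlen
  have hrange : ∀ k : Nat, (pvStep matrix n)^[k] {0} ⊆ insert 0 (Finset.range matrix.length) := by
    intro k
    induction k with
    | zero => simp
    | succ k ih =>
      rw [Function.iterate_succ_apply']
      unfold pvStep
      refine Finset.union_subset ih (Finset.biUnion_subset.2 fun j _ => ?_)
      intro x hx
      rw [List.mem_toFinset, List.mem_filterMap] at hx
      obtain ⟨e, _, he⟩ := hx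
      split at he
      · rename_i hcond
        cases he
        simp only [Finset.mem_insert, Finset.mem_range]
        right; omega
      · cases he
  have haux : ∀ k : Nat, pvStep matrix n ((pvStep matrix n)^[k] {0}) = (pvStep matrix n)^[k] {0} ∨
      k + 1 ≤ ((pvStep matrix n)^[k] {0}).card := by
    intro k
    induction k with
    | zero => right; simp
    | succ k ih =>
      rcases ih with hfix | hcard
      · left
        rw [Function.iterate_succ_apply', hfix, hfix]
      · by_cases hfix : pvStep matrix n ((pvStep matrix n)^[k] {0}) = (pvStep matrix n)^[k] {0}
        · left
          rw [Function.iterate_succ_apply', hfix, hfix]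
        · right
          rw [Function.iterate_succ_apply']
          have hss : (pvStep matrix n)^[k] {0} ⊂ pvStep matrix n ((pvStep matrix n)^[k] {0}) :=
            Finset.ssubset_iff_subset_ne.2 ⟨pvStep_subset matrix n _, fun h => hfix h.symm⟩
          have := Finset.card_lt_card hss
          omega
  rcases haux matrix.length with hfix | hcard
  · exact hfix
  · exfalso
    have h1 := Finset.card_le_card (hrange matrix.length)
    have h2 : (insert 0 (Finset.range matrix.length)).card ≤ matrix.length := by
      rw [Finset.insert_eq_self.2 (Finset.mem_range.2 hlen0)]
      simp
    omega

theorem pvReachSet_closed (matrix : List (List Int)) (n : Int) {j : Nat} {e : Int}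
    (hj : j ∈ pvReachSet matrix n) (he : e ∈ matrix.getD j [])
    (h0 : 0 ≤ e) (h1 : e < n) (h2 : e < (matrix.length : Int)) :
    e.toNat ∈ pvReachSet matrix n := by
  rw [← pvReachSet_fix matrix n]
  unfold pvStep
  refine Finset.mem_union_right _ (Finset.mem_biUnion.2 ⟨j, hj, ?_⟩)
  rw [List.mem_toFinset, List.mem_filterMap]
  exact ⟨e, he, by rw [if_pos ⟨h0, h1, h2⟩]⟩

-- visit array invariant
def pvGood (n : Nat) (vis : List Int) : Prop := vis.length = n ∧ ∀ x ∈ vis, x = 0 ∨ x = 1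

-- reachability from s through originally-unvisited nodes
inductive pvReach (matrix : List (List Int)) (vis : List Int) (s : Nat) : Nat → Prop
  | refl : pvReach matrix vis s s
  | step {j : Nat} (w : Int) : pvReach matrix vis s j → w ∈ pvAdj matrix j →
      vis.getD w.toNat 1 = 0 → pvReach matrix vis s w.toNat

theorem pvReach_mono (matrix : List (List Int)) (vis vis' : List Int)
    (hmono : ∀ j, pvMk vis j → pvMk vis' j) {s t : Nat}
    (h : pvReach matrix vis' s t) : pvReach matrix vis s t := by
  induction h with
  | refl => exact .refl
  | step w hr hw hz ih =>
    refine .step w ih hw ?_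
    by_contra hne
    exact (hmono _ hne) hz

theorem pvReach_trans (matrix : List (List Int)) (vis : List Int) {a b c : Nat}
    (h1 : pvReach matrix vis a b) (h2 : pvReach matrix vis b c) : pvReach matrix vis a c := by
  induction h2 with
  | refl => exact h1
  | step w hr hw hz ih => exact .step w ih hw hz

theorem pvMk_set (vis : List Int) (k j : Nat) (hk : k < vis.length) :
    pvMk (vis.set k 1) j ↔ (j = k ∨ pvMk vis j) := by
  unfold pvMk
  by_cases hj : j = k
  · subst hj
    rw [List.getD_eq_getElem _ _ (by simpa using hk), List.getElem_set_self (by simpa using hk)]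
    simp
  · by_cases hlen : j < vis.length
    · rw [List.getD_eq_getElem _ _ (by simpa using hlen),
        List.getD_eq_getElem _ _ hlen, List.getElem_set_ne (by omega)]
      tauto
    · rw [List.getD_eq_default _ _ (by simpa using hlen),
        List.getD_eq_default _ _ (by omega)]
      tauto

theorem pvGood_set (n : Nat) (vis : List Int) (hg : pvGood n vis) (k : Nat) :
    pvGood n (vis.set k 1) := by
  refine ⟨by simpa using hg.1, fun x hx => ?_⟩
  rcases List.mem_or_eq_of_mem_set hx with h | h
  · exact hg.2 x h
  · right; exact h

theorem pvGet_eq (vis : List Int) (i : Int) (h0 : 0 ≤ i) (h1 : i < (vis.length : Int)) :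
    pvGet vis i = vis.getD i.toNat 1 := by
  unfold pvGet
  rw [PySem.List.pyGetD_eq_getElem vis 1 h0 (by simpa using h1),
    List.getD_eq_getElem _ _ (by omega)]

theorem pvMark_eq (vis : List Int) (i : Int) (h0 : 0 ≤ i) :
    pvMark vis i = vis.set i.toNat 1 := by
  unfold pvMark
  exact PySem.List.pySetD_of_nonneg vis 1 h0

theorem pvMk_mark (vis : List Int) (u : Int) (hu0 : 0 ≤ u) (hk : u.toNat < vis.length) (j : Nat) :
    pvMk (pvMark vis u) j ↔ (j = u.toNat ∨ pvMk vis j) := by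
  rw [pvMark_eq vis u hu0]
  exact pvMk_set vis u.toNat j hk

theorem markScan_acc (row vis acc : List Int) :
    markScan vis acc row = ((markScan vis [] row).1, acc ++ (markScan vis [] row).2) := by
  induction row generalizing vis acc with
  | nil => simp [markScan]
  | cons i row ih =>
    simp only [markScan, List.foldl_cons]
    by_cases hc : pvGet vis i == 0
    · simp only [hc, if_pos]
      have h1 := ih (pvMark vis i) (acc ++ [i])
      have h2 := ih (pvMark vis i) ([] ++ [i])
      simp only [markScan] at h1 h2
      rw [h1, h2]
      simp
    · simp only [hc, if_neg, Bool.false_eq_true, not_false_iff]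
      have h1 := ih vis acc
      have h2 := ih vis []
      simp only [markScan] at h1 h2
      rw [h1, h2]

theorem markScan_char (n : Nat) (row vis : List Int)
    (hrow : ∀ e ∈ row, 0 ≤ e ∧ e < (n : Int)) (hg : pvGood n vis) :
    pvGood n (markScan vis [] row).1 ∧
    (∀ j : Nat, pvMk (markScan vis [] row).1 j ↔ pvMk vis j ∨ ∃ w ∈ row, w.toNat = j) ∧
    (∀ x : Int, x ∈ (markScan vis [] row).2 ↔ x ∈ row ∧ ¬ pvMk vis x.toNat) := by
  induction row generalizing vis with
  | nil =>
    refine ⟨hg, fun j => by simp [markScan], fun x => by simp [markScan]⟩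
  | cons i row ih =>
    obtain ⟨hi0, hin⟩ := hrow i (List.mem_cons_self ..)
    have hlen : vis.length = n := hg.1
    have hitn : i.toNat < vis.length := by omega
    have hget : pvGet vis i = vis.getD i.toNat 1 :=
      pvGet_eq vis i hi0 (by rw [hlen]; exact hin)
    have hstep : markScan vis [] (i :: row) =
        (if pvGet vis i == 0 then markScan (pvMark vis i) [i] row else markScan vis [] row) := by
      simp only [markScan, List.foldl_cons]
      by_cases hc : pvGet vis i == 0 <;> simp [hc]
    by_cases hc : pvGet vis i = 0
    · -- i was unvisited: mark it and push it
      have hmk0 : ¬ pvMk vis i.toNat := by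
        unfold pvMk; rw [← hget, hc]; simp
      rw [if_pos (by simpa using hc)] at hstep
      have hmark : pvMark vis i = vis.set i.toNat 1 := pvMark_eq vis i hi0
      have hg1 : pvGood n (vis.set i.toNat 1) := pvGood_set n vis hg i.toNat
      have hmkset : ∀ j, pvMk (vis.set i.toNat 1) j ↔ (j = i.toNat ∨ pvMk vis j) :=
        fun j => pvMk_set vis i.toNat j hitn
      obtain ⟨ihg, ihmk, ihpush⟩ := ih (vis.set i.toNat 1)
        (fun e he => hrow e (List.mem_cons_of_mem _ he)) hg1
      have hacc := markScan_acc row (vis.set i.toNat 1) [i]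
      rw [hstep, hmark, hacc]
      refine ⟨ihg, fun j => ?_, fun x => ?_⟩
      · rw [ihmk j]
        constructor
        · rintro (hj | ⟨w, hw, rfl⟩)
          · rcases (hmkset j).1 hj with rfl | hj'
            · exact Or.inr ⟨i, List.mem_cons_self .., rfl⟩
            · exact Or.inl hj'
          · exact Or.inr ⟨w, List.mem_cons_of_mem _ hw, rfl⟩
        · rintro (hj | ⟨w, hw, rfl⟩)
          · exact Or.inl ((hmkset j).2 (Or.inr hj))
          · rcases List.mem_cons.1 hw with rfl | hw'
            · exact Or.inl ((hmkset _).2 (Or.inl rfl))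
            · exact Or.inr ⟨w, hw', rfl⟩
      · simp only [List.cons_append, List.nil_append, List.mem_cons]
        rw [ihpush x]
        constructor
        · rintro (rfl | ⟨hxr, hxm⟩)
          · exact ⟨Or.inl rfl, hmk0⟩
          · exact ⟨Or.inr hxr, fun hm => hxm ((hmkset _).2 (Or.inr hm))⟩
        · rintro ⟨hx, hxm⟩
          rcases hx with rfl | hx'
          · exact Or.inl rfl
          · by_cases hxi : x = i
            · exact Or.inl hxi
            · refine Or.inr ⟨hx', fun hm => ?_⟩
              rcases (hmkset _).1 hm with he | hm'
              · obtain ⟨hx0, _⟩ := hrow x (List.mem_cons_of_mem _ hx')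
                exact hxi (by omega)
              · exact hxm hm'
    · -- i already visited: nothing happens
      have hmk1 : pvMk vis i.toNat := by
        unfold pvMk; rw [← hget]; exact hc
      rw [if_neg (by simpa using hc)] at hstep
      obtain ⟨ihg, ihmk, ihpush⟩ := ih vis (fun e he => hrow e (List.mem_cons_of_mem _ he)) hg
      rw [hstep]
      refine ⟨ihg, fun j => ?_, fun x => ?_⟩
      · rw [ihmk j]
        constructor
        · rintro (hj | ⟨w, hw, rfl⟩)
          · exact Or.inl hj
          · exact Or.inr ⟨w, List.mem_cons_of_mem _ hw, rfl⟩
        · rintro (hj | ⟨w, hw, rfl⟩)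
          · exact Or.inl hj
          · rcases List.mem_cons.1 hw with rfl | hw'
            · exact Or.inl hmk1
            · exact Or.inr ⟨w, hw', rfl⟩
      · rw [ihpush x]
        constructor
        · rintro ⟨hxr, hxm⟩
          exact ⟨List.mem_cons_of_mem _ hxr, hxm⟩
        · rintro ⟨hx, hxm⟩
          rcases List.mem_cons.1 hx with rfl | hx'
          · exact absurd hmk1 hxm
          · exact ⟨hx', hxm⟩

-- the splice lemma: one pop step does not change "marked or reachable from the worklist"
theorem pvSplice (matrix : List (List Int)) (vis vis' : List Int)
    (v : Int) (hv0 : 0 ≤ v) (hmkv : pvMk vis v.toNat)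
    (pushed S S' : List Int)
    (hmk' : ∀ j : Nat, pvMk vis' j ↔ pvMk vis j ∨ ∃ w ∈ pvAdj matrix v.toNat, w.toNat = j)
    (hpush : ∀ x : Int, x ∈ pushed ↔ x ∈ pvAdj matrix v.toNat ∧ ¬ pvMk vis x.toNat)
    (hS' : ∀ x : Int, x ∈ S' ↔ x ∈ S ∨ x ∈ pushed) :
    ∀ j : Nat, (pvMk vis j ∨ ∃ s : Int, (s ∈ S ∨ s = v) ∧ pvReach matrix vis s.toNat j) ↔
      (pvMk vis' j ∨ ∃ x ∈ S', pvReach matrix vis' x.toNat j) := by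
  have hmono : ∀ j, pvMk vis j → pvMk vis' j := fun j hj => (hmk' j).2 (Or.inl hj)
  have hstep' : ∀ {a : Nat} (w : Int) {j : Nat}, pvReach matrix vis' a j → w ∈ pvAdj matrix j →
      ¬ pvMk vis' w.toNat → pvReach matrix vis' a w.toNat := by
    intro a w j hr hw hm
    exact .step w hr hw (by unfold pvMk at hm; omega)
  -- forward: everything reachable in the old state is marked or reachable in the new one
  have fwd : ∀ (s : Int), (s ∈ S ∨ s = v) → ∀ j, pvReach matrix vis s.toNat j →
      (j = s.toNat ∨ ¬ pvMk vis j) ∧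
      (pvMk vis' j ∨ ∃ x ∈ S', pvReach matrix vis' x.toNat j) := by
    intro s hs j hr
    induction hr with
    | refl =>
      refine ⟨Or.inl rfl, ?_⟩
      rcases hs with hsS | rfl
      · exact Or.inr ⟨s, (hS' s).2 (Or.inl hsS), .refl⟩
      · exact Or.inl (hmono _ hmkv)
    | step w hr hw hz ih =>
      have hwnm : ¬ pvMk vis w.toNat := by unfold pvMk; omega
      refine ⟨Or.inr hwnm, ?_⟩
      by_cases hm' : pvMk vis' w.toNat
      · exact Or.inl hm'
      · rcases ih.2 with hmj | ⟨x, hx, hxr⟩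
        · -- predecessor j is marked in vis'
          rcases ih.1 with rfl | hjnm
          · rcases hs with hsS | rfl
            · exact Or.inr ⟨s, (hS' s).2 (Or.inl hsS), hstep' w .refl hw hm'⟩
            · -- j = v.toNat: w is an unvisited neighbour of v, so it was pushed
              exact absurd ((hmk' w.toNat).2 (Or.inr ⟨w, hw, rfl⟩)) hm'
          · -- j newly marked: some pushed node lands on j
            rcases (hmk' _).1 hmj with hjm | ⟨w', hw', hw'j⟩
            · exact absurd hjm hjnm
            · have hw'p : w' ∈ pushed := (hpush w').2 ⟨hw', by rw [hw'j]; exact hjnm⟩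
              have : pvReach matrix vis' w'.toNat w.toNat :=
                hstep' w (hw'j ▸ .refl) hw hm'
              exact Or.inr ⟨w', (hS' w').2 (Or.inr hw'p), this⟩
        · exact Or.inr ⟨x, hx, hstep' w hxr hw hm'⟩
  intro j
  constructor
  · rintro (hj | ⟨s, hs, hr⟩)
    · exact Or.inl (hmono j hj)
    · exact (fwd s hs j hr).2
  · rintro (hj | ⟨x, hx, hr⟩)
    · rcases (hmk' j).1 hj with hjm | ⟨w, hw, rfl⟩
      · exact Or.inl hjm
      · by_cases hm : pvMk vis w.toNat
        · exact Or.inl hm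
        · exact Or.inr ⟨v, Or.inr rfl, .step w .refl hw (by unfold pvMk at hm; omega)⟩
    · have hr' : pvReach matrix vis x.toNat j := pvReach_mono matrix vis vis' hmono hr
      rcases (hS' x).1 hx with hxS | hxp
      · exact Or.inr ⟨x, Or.inl hxS, hr'⟩
      · obtain ⟨hxr, hxm⟩ := (hpush x).1 hxp
        refine Or.inr ⟨v, Or.inr rfl, pvReach_trans matrix vis ?_ hr'⟩
        exact .step x .refl hxr (by unfold pvMk at hxm; omega)

theorem whileA_nil (matrix : List (List Int)) (vis : List Int) :
    whileA matrix vis [] = (0, vis) := by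
  rw [whileA]; simp

theorem whileA_cons (matrix : List (List Int)) (vis queue : List Int) (h : queue ≠ []) :
    whileA matrix vis queue =
      ((whileA matrix
          (markScan vis queue.dropLast ((PySem.List.pyGet? matrix (queue.getLast h)).getD [])).1
          (markScan vis queue.dropLast ((PySem.List.pyGet? matrix (queue.getLast h)).getD [])).2).1 + 1,
       (whileA matrix
          (markScan vis queue.dropLast ((PySem.List.pyGet? matrix (queue.getLast h)).getD [])).1
          (markScan vis queue.dropLast ((PySem.List.pyGet? matrix (queue.getLast h)).getD [])).2).2) := by
  conv_lhs => rw [whileA]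
  simp [h]

theorem whileA_char (matrix : List (List Int)) (n : Nat) (hWF : pvWF matrix n) :
    ∀ (m : Nat) (vis queue : List Int), pvCZ vis + queue.length = m → pvGood n vis →
      (∀ s ∈ queue, 0 ≤ s ∧ s < (n : Int) ∧ s < (matrix.length : Int) ∧ s.toNat ∈ pvReachSet matrix (n : Int) ∧ pvMk vis s.toNat) →
      pvGood n (whileA matrix vis queue).2 ∧
      (∀ j : Nat, pvMk (whileA matrix vis queue).2 j ↔ pvMk vis j ∨ ∃ s ∈ queue, pvReach matrix vis s.toNat j) ∧
      (whileA matrix vis queue).1 = (pvCZ vis : Int) + queue.length - (pvCZ (whileA matrix vis queue).2 : Int) := by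
  intro m
  induction m using Nat.strong_induction_on with
  | _ m IH =>
  intro vis queue hm hg hq
  by_cases hqe : queue = []
  · subst hqe
    rw [whileA_nil]
    refine ⟨hg, fun j => by simp, by simp⟩
  · obtain ⟨hv0, hvn, hvl, hvR, hvmk⟩ := hq (queue.getLast hqe) (List.getLast_mem hqe)
    have hrowEq : (PySem.List.pyGet? matrix (queue.getLast hqe)).getD [] =
        pvAdj matrix (queue.getLast hqe).toNat := by
      rw [PySem.List.pyGet?_eq_some_getElem matrix hv0 (by omega)]
      unfold pvAdj
      rw [List.getD_eq_getElem _ _ (by omega)]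
      rfl
    have hrowB : ∀ e ∈ (PySem.List.pyGet? matrix (queue.getLast hqe)).getD [],
        0 ≤ e ∧ e < (n : Int) ∧ e < (matrix.length : Int) := by
      rw [hrowEq]; unfold pvAdj
      exact fun e he => hWF.2.2 (queue.getLast hqe).toNat hvR e he
    obtain ⟨mscg, mscmk, mscpush⟩ :=
      markScan_char n ((PySem.List.pyGet? matrix (queue.getLast hqe)).getD []) vis
        (fun e he => ⟨(hrowB e he).1, (hrowB e he).2.1⟩) hg
    have hacc := markScan_acc ((PySem.List.pyGet? matrix (queue.getLast hqe)).getD []) vis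
      queue.dropLast
    have hms0 := markScan_measure ((PySem.List.pyGet? matrix (queue.getLast hqe)).getD []) vis []
    rw [whileA_cons matrix vis queue hqe, hacc]
    have hq' : ∀ s ∈ queue.dropLast ++
        (markScan vis [] ((PySem.List.pyGet? matrix (queue.getLast hqe)).getD [])).2,
        0 ≤ s ∧ s < (n : Int) ∧ s < (matrix.length : Int) ∧ s.toNat ∈ pvReachSet matrix (n : Int) ∧
          pvMk (markScan vis [] ((PySem.List.pyGet? matrix (queue.getLast hqe)).getD [])).1 s.toNat := by
      intro s hs
      rcases List.mem_append.1 hs with hs1 | hs2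
      · obtain ⟨h1, h2, h3, h4, h5⟩ := hq s (List.mem_of_mem_dropLast hs1)
        exact ⟨h1, h2, h3, h4, (mscmk _).2 (Or.inl h5)⟩
      · obtain ⟨hsr, _⟩ := (mscpush s).1 hs2
        obtain ⟨h1, h2, h3⟩ := hrowB s hsr
        have hmem : s.toNat ∈ pvReachSet matrix (n : Int) := by
          refine pvReachSet_closed matrix (n : Int) hvR ?_ h1 h2 h3
          rw [hrowEq] at hsr
          unfold pvAdj at hsr
          exact hsr
        exact ⟨h1, h2, h3, hmem, (mscmk _).2 (Or.inr ⟨s, hsr, rfl⟩)⟩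
    have hql : queue.length ≠ 0 := by simpa using hqe
    have hdl : queue.dropLast.length = queue.length - 1 := List.length_dropLast
    have hmlt : pvCZ (markScan vis [] ((PySem.List.pyGet? matrix (queue.getLast hqe)).getD [])).1 +
        (queue.dropLast ++
          (markScan vis [] ((PySem.List.pyGet? matrix (queue.getLast hqe)).getD [])).2).length < m := by
      simp only [List.length_append]
      simp only [List.length_nil] at hms0
      omega
    obtain ⟨ihg, ihmk, ihcnt⟩ := IH _ hmlt _ _ rfl mscg hq'
    refine ⟨ihg, fun j => ?_, ?_⟩
    · rw [ihmk j]
      have hsp := pvSplice matrix vis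
        (markScan vis [] ((PySem.List.pyGet? matrix (queue.getLast hqe)).getD [])).1
        (queue.getLast hqe) hv0 hvmk
        (markScan vis [] ((PySem.List.pyGet? matrix (queue.getLast hqe)).getD [])).2
        queue.dropLast
        (queue.dropLast ++ (markScan vis [] ((PySem.List.pyGet? matrix (queue.getLast hqe)).getD [])).2)
        (fun j => by rw [← hrowEq]; exact mscmk j)
        (fun x => by rw [← hrowEq]; exact mscpush x)
        (fun x => List.mem_append) j
      rw [← hsp]
      have hqmem : ∀ s : Int, s ∈ queue ↔ s ∈ queue.dropLast ∨ s = queue.getLast hqe := by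
        intro s
        conv_lhs => rw [← List.dropLast_append_getLast hqe]
        simp
      constructor
      · rintro (hj | ⟨s, hs, hr⟩)
        · exact Or.inl hj
        · exact Or.inr ⟨s, (hqmem s).2 hs, hr⟩
      · rintro (hj | ⟨s, hs, hr⟩)
        · exact Or.inl hj
        · exact Or.inr ⟨s, (hqmem s).1 hs, hr⟩
    · rw [ihcnt]
      simp only [List.length_append, List.length_nil] at *
      push_cast
      omega

-- ===== B-side lemmas: the sweep fixed point computes the same closure =====

-- phase invariants carried through the outer loop
def pvCL (matrix : List (List Int)) (n : Nat) (vis : List Int) : Prop :=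
  ∀ j : Nat, j ≠ 0 → (j : Int) < (n : Int) → pvMk vis j → ∀ e ∈ pvAdj matrix j, pvMk vis e.toNat
def pvINV (matrix : List (List Int)) (n : Nat) (vis : List Int) : Prop :=
  ∀ j : Nat, j ≠ 0 → (j : Int) < (n : Int) → pvMk vis j →
    (j : Int) < (matrix.length : Int) ∧ j ∈ pvReachSet matrix (n : Int)
-- sweep-state invariants (vis1 = phase-start array, u = current child)
def pvMONO (vis1 cur : List Int) : Prop := ∀ j, pvMk vis1 j → pvMk cur j
def pvSOUND (matrix : List (List Int)) (vis1 cur : List Int) (u : Nat) : Prop :=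
  ∀ j, pvMk cur j → pvMk vis1 j ∨ pvReach matrix vis1 u j
def pvHSRC (matrix : List (List Int)) (n : Nat) (vis1 : List Int) (u : Nat) : Prop :=
  ∀ v : Nat, v ≠ 0 → (v : Int) < (n : Int) → (pvMk vis1 v ∨ pvReach matrix vis1 u v) →
    ∀ e ∈ pvAdjI matrix (v : Int), 0 ≤ e ∧ e < (n : Int) ∧
      (pvMk vis1 e.toNat ∨ pvReach matrix vis1 u e.toNat)

theorem pvAdjI_eq (matrix : List (List Int)) (i : Int) (h0 : 0 ≤ i) :
    pvAdjI matrix i = pvAdj matrix i.toNat := by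
  unfold pvAdjI pvAdj
  by_cases h : i < (matrix.length : Int)
  · rw [PySem.List.pyGet?_eq_some_getElem matrix h0 (by simpa using h)]
    rw [List.getD_eq_getElem _ _ (by omega)]
    rfl
  · have hnone : PySem.List.pyGet? matrix i = none := by
      simp only [PySem.List.pyGet?, PySem.List.pyIdx?]
      split_ifs
      all_goals simp_all
    rw [hnone, List.getD_eq_default _ _ (by omega)]
    rfl

theorem pvCount0 (vis : List Int) : PySem.List.count vis 0 = (pvCZ vis : Int) := by
  rw [PySem.List.count_eq]
  unfold pvCZ
  norm_num [List.count]

theorem pvReach_props (matrix : List (List Int)) (n : Nat) (hWF : pvWF matrix n)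
    (vis : List Int) (s : Nat) (hsn : (s : Int) < (n : Int)) (hsl : (s : Int) < (matrix.length : Int))
    (hsR : s ∈ pvReachSet matrix (n : Int)) :
    ∀ j : Nat, pvReach matrix vis s j →
      (j : Int) < (n : Int) ∧ (j : Int) < (matrix.length : Int) ∧ j ∈ pvReachSet matrix (n : Int) := by
  intro j h
  induction h with
  | refl => exact ⟨hsn, hsl, hsR⟩
  | step w hr hw hz ih =>
    obtain ⟨h1, h2, h3⟩ := ih
    obtain ⟨hw0, hwn, hwl⟩ := hWF.2.2 _ h3 w hw
    refine ⟨by omega, by omega, pvReachSet_closed matrix (n : Int) h3 hw hw0 hwn hwl⟩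

theorem pvReach_ne_zero (matrix : List (List Int)) (vis : List Int) (s : Nat)
    (hs : s ≠ 0) (h0 : pvMk vis 0) :
    ∀ j : Nat, pvReach matrix vis s j → j ≠ 0 := by
  intro j h
  induction h with
  | refl => exact hs
  | step w hr hw hz ih =>
    intro hc
    rw [hc] at hz
    exact h0 hz

theorem sweepRow_cons (vis : List Int) (chg : Bool) (w : Int) (row : List Int) :
    sweepRow vis chg (w :: row) =
      if pvGet vis w == 0 then sweepRow (pvMark vis w) true row else sweepRow vis chg row := by
  simp only [sweepRow, List.foldl_cons]
  by_cases hc : pvGet vis w == 0 <;> simp [hc]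

theorem sweepRow_flag : ∀ (row vis : List Int), (sweepRow vis true row).2 = true := by
  intro row
  induction row with
  | nil => intro vis; simp [sweepRow]
  | cons w row ih =>
    intro vis
    rw [sweepRow_cons]
    by_cases hc : pvGet vis w == 0
    · rw [if_pos hc]; exact ih _
    · rw [if_neg hc]; exact ih _

theorem sweepRow_false : ∀ (row vis : List Int) (chg : Bool),
    (sweepRow vis chg row).2 = false →
    (sweepRow vis chg row).1 = vis ∧ chg = false ∧ ∀ e ∈ row, ¬ (pvGet vis e == 0) := by
  intro row
  induction row with
  | nil => intro vis chg h; simp [sweepRow] at h ⊢; simpa [sweepRow] using h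
  | cons w row ih =>
    intro vis chg h
    rw [sweepRow_cons] at h
    by_cases hc : pvGet vis w == 0
    · rw [if_pos hc] at h
      rw [sweepRow_flag] at h
      exact absurd h (by simp)
    · rw [if_neg hc] at h
      obtain ⟨h1, h2, h3⟩ := ih vis chg h
      refine ⟨by rw [sweepRow_cons, if_neg hc]; exact h1, h2, ?_⟩
      intro e he
      rcases List.mem_cons.1 he with rfl | he'
      · exact hc
      · exact h3 e he'

theorem sweepRow_sound (matrix : List (List Int)) (n : Nat) (vis1 : List Int) (u : Nat) :
    ∀ (row : List Int),
      (∀ e ∈ row, 0 ≤ e ∧ e < (n : Int) ∧ (pvMk vis1 e.toNat ∨ pvReach matrix vis1 u e.toNat)) →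
      ∀ (cur : List Int) (chg : Bool), pvGood n cur → pvMONO vis1 cur → pvSOUND matrix vis1 cur u →
      pvGood n (sweepRow cur chg row).1 ∧ pvMONO vis1 (sweepRow cur chg row).1 ∧
        pvSOUND matrix vis1 (sweepRow cur chg row).1 u ∧
        (∀ j, pvMk cur j → pvMk (sweepRow cur chg row).1 j) := by
  intro row
  induction row with
  | nil =>
    intro _ cur chg hg hmono hsound
    exact ⟨by simpa [sweepRow] using hg, by simpa [sweepRow] using hmono,
      by simpa [sweepRow] using hsound, fun j h => by simpa [sweepRow] using h⟩
  | cons w row ih =>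
    intro hrow cur chg hg hmono hsound
    obtain ⟨hw0, hwn, hwd⟩ := hrow w (List.mem_cons_self ..)
    rw [sweepRow_cons]
    by_cases hc : pvGet cur w == 0
    · rw [if_pos hc]
      have hwt : w.toNat < cur.length := by
        have := hg.1; omega
      have hmkiff : ∀ j, pvMk (pvMark cur w) j ↔ (j = w.toNat ∨ pvMk cur j) :=
        pvMk_mark cur w hw0 hwt
      have hg' : pvGood n (pvMark cur w) := by
        rw [pvMark_eq cur w hw0]; exact pvGood_set n cur hg w.toNat
      have hmono' : pvMONO vis1 (pvMark cur w) :=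
        fun j hj => (hmkiff j).2 (Or.inr (hmono j hj))
      have hsound' : pvSOUND matrix vis1 (pvMark cur w) u := by
        intro j hj
        rcases (hmkiff j).1 hj with rfl | hj'
        · exact hwd
        · exact hsound j hj'
      obtain ⟨g1, g2, g3, g4⟩ := ih (fun e he => hrow e (List.mem_cons_of_mem _ he))
        (pvMark cur w) true hg' hmono' hsound'
      exact ⟨g1, g2, g3, fun j hj => g4 j ((hmkiff j).2 (Or.inr hj))⟩
    · rw [if_neg hc]
      exact ih (fun e he => hrow e (List.mem_cons_of_mem _ he)) cur chg hg hmono hsound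

theorem sweepFold_flag (matrix : List (List Int)) :
    ∀ (l : List Int) (st : List Int × Bool), st.2 = true →
      (l.foldl (fun s v => if pvGet s.1 v == 1 then sweepRow s.1 s.2 (pvAdjI matrix v) else s) st).2 = true := by
  intro l
  induction l with
  | nil => intro st h; exact h
  | cons v l ih =>
    intro st h
    simp only [List.foldl_cons]
    by_cases hc : pvGet st.1 v == 1
    · rw [if_pos hc]
      refine ih _ ?_
      rw [h]
      exact sweepRow_flag _ _
    · rw [if_neg hc]; exact ih st h

theorem sweepFold_false (matrix : List (List Int)) :
    ∀ (l : List Int) (cur : List Int),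
      (l.foldl (fun s v => if pvGet s.1 v == 1 then sweepRow s.1 s.2 (pvAdjI matrix v) else s) (cur, false)).2 = false →
      (l.foldl (fun s v => if pvGet s.1 v == 1 then sweepRow s.1 s.2 (pvAdjI matrix v) else s) (cur, false)).1 = cur ∧
        ∀ v ∈ l, pvGet cur v == 1 → ∀ e ∈ pvAdjI matrix v, ¬ (pvGet cur e == 0) := by
  intro l
  induction l with
  | nil => intro cur _; exact ⟨rfl, by simp⟩
  | cons v l ih =>
    intro cur h
    simp only [List.foldl_cons] at h ⊢
    by_cases hc : pvGet cur v == 1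
    · rw [if_pos hc] at h ⊢
      by_cases hr2 : (sweepRow cur false (pvAdjI matrix v)).2 = true
      · rw [sweepFold_flag matrix l _ hr2] at h
        exact absurd h (by simp)
      · have hr2' : (sweepRow cur false (pvAdjI matrix v)).2 = false := by
          simpa using hr2
        obtain ⟨he1, _, he3⟩ := sweepRow_false (pvAdjI matrix v) cur false hr2'
        have hst : sweepRow cur false (pvAdjI matrix v) = (cur, false) := by
          exact Prod.ext he1 hr2'
        rw [hst] at h ⊢
        obtain ⟨g1, g2⟩ := ih cur h
        refine ⟨g1, ?_⟩
        intro v' hv' hgv' e he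
        rcases List.mem_cons.1 hv' with rfl | hv''
        · exact he3 e he
        · exact g2 v' hv'' hgv' e he
    · rw [if_neg hc] at h ⊢
      obtain ⟨g1, g2⟩ := ih cur h
      refine ⟨g1, ?_⟩
      intro v' hv' hgv' e he
      rcases List.mem_cons.1 hv' with rfl | hv''
      · exact absurd hgv' hc
      · exact g2 v' hv'' hgv' e he

theorem sweepFold_sound (matrix : List (List Int)) (n : Nat) (vis1 : List Int) (u : Nat)
    (hsrc : pvHSRC matrix n vis1 u) :
    ∀ (l : List Int), (∀ v ∈ l, 1 ≤ v ∧ v < (n : Int)) →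
      ∀ (st : List Int × Bool), pvGood n st.1 → pvMONO vis1 st.1 → pvSOUND matrix vis1 st.1 u →
      pvGood n (l.foldl (fun s v => if pvGet s.1 v == 1 then sweepRow s.1 s.2 (pvAdjI matrix v) else s) st).1 ∧
        pvMONO vis1 (l.foldl (fun s v => if pvGet s.1 v == 1 then sweepRow s.1 s.2 (pvAdjI matrix v) else s) st).1 ∧
        pvSOUND matrix vis1 (l.foldl (fun s v => if pvGet s.1 v == 1 then sweepRow s.1 s.2 (pvAdjI matrix v) else s) st).1 u := by
  intro l
  induction l with
  | nil => intro _ st hg hm hs; exact ⟨hg, hm, hs⟩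
  | cons v l ih =>
    intro hl st hg hm hs
    obtain ⟨hv1, hvn⟩ := hl v (List.mem_cons_self ..)
    simp only [List.foldl_cons]
    by_cases hc : pvGet st.1 v == 1
    · rw [if_pos hc]
      have hvcast : ((v.toNat : Nat) : Int) = v := Int.toNat_of_nonneg (by omega)
      have hvm : pvMk st.1 v.toNat := by
        have hget : pvGet st.1 v = st.1.getD v.toNat 1 :=
          pvGet_eq st.1 v (by omega) (by rw [hg.1]; omega)
        unfold pvMk
        rw [← hget]
        intro hz
        rw [hz] at hc
        simp at hc
      have hrow := hsrc v.toNat (by omega) (by omega) (hs v.toNat hvm)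
      rw [hvcast] at hrow
      obtain ⟨g1, g2, g3, _⟩ :=
        sweepRow_sound matrix n vis1 u (pvAdjI matrix v) hrow st.1 st.2 hg hm hs
      exact ih (fun x hx => hl x (List.mem_cons_of_mem _ hx)) _ g1 g2 g3
    · rw [if_neg hc]
      exact ih (fun x hx => hl x (List.mem_cons_of_mem _ hx)) st hg hm hs

theorem sweepLoop_eq (matrix : List (List Int)) (N : Int) (cur : List Int) :
    sweepLoop matrix N cur =
      if (sweepOnce matrix N cur).2 = true then sweepLoop matrix N (sweepOnce matrix N cur).1
      else (sweepOnce matrix N cur).1 := by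
  rw [sweepLoop]
  simp

theorem sweepLoop_char (matrix : List (List Int)) (N : Int) (n : Nat) (hN : N = (n : Int))
    (vis1 : List Int) (u : Nat) (hsrc : pvHSRC matrix n vis1 u) :
    ∀ (m : Nat) (cur : List Int), pvCZ cur = m → pvGood n cur → pvMONO vis1 cur →
      pvSOUND matrix vis1 cur u →
      pvGood n (sweepLoop matrix N cur) ∧ pvMONO vis1 (sweepLoop matrix N cur) ∧
        pvSOUND matrix vis1 (sweepLoop matrix N cur) u ∧
        (∀ v ∈ PySem.List.pyRange 1 N 1, pvGet (sweepLoop matrix N cur) v == 1 →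
          ∀ e ∈ pvAdjI matrix v, ¬ (pvGet (sweepLoop matrix N cur) e == 0)) := by
  intro m
  induction m using Nat.strong_induction_on with
  | _ m IH =>
  intro cur hm hg hmono hsound
  have hl : ∀ v ∈ PySem.List.pyRange 1 N 1, 1 ≤ v ∧ v < (n : Int) := by
    intro v hv
    rw [PySem.List.mem_pyRange_one] at hv
    omega
  have hstep := sweepFold_sound matrix n vis1 u hsrc (PySem.List.pyRange 1 N 1) hl
    (cur, false) hg hmono hsound
  rw [sweepLoop_eq]
  by_cases hflag : (sweepOnce matrix N cur).2 = true
  · rw [if_pos hflag]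
    have hlt : pvCZ (sweepOnce matrix N cur).1 < m := by
      have := (sweepOnce_measure matrix N cur).2 hflag
      omega
    exact IH _ hlt _ rfl hstep.1 hstep.2.1 hstep.2.2
  · rw [if_neg hflag]
    have hflag' : (sweepOnce matrix N cur).2 = false := by simpa using hflag
    obtain ⟨heq, hstab⟩ := sweepFold_false matrix (PySem.List.pyRange 1 N 1) cur hflag'
    have heq' : (sweepOnce matrix N cur).1 = cur := heq
    rw [heq']
    exact ⟨hg, hmono, hsound, hstab⟩

theorem stable_closed (matrix : List (List Int)) (N : Int) (n : Nat) (hN : N = (n : Int))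
    (hWF : pvWF matrix n) (vis1 R : List Int) (u : Nat)
    (huz : u ≠ 0) (hun : (u : Int) < (n : Int)) (hul : (u : Int) < (matrix.length : Int))
    (huR : u ∈ pvReachSet matrix (n : Int))
    (hgood : pvGood n R) (hmono : pvMONO vis1 R) (h0 : pvMk vis1 0) (hu1 : pvMk vis1 u)
    (hstab : ∀ v ∈ PySem.List.pyRange 1 N 1, pvGet R v == 1 →
      ∀ e ∈ pvAdjI matrix v, ¬ (pvGet R e == 0)) :
    ∀ j, pvReach matrix vis1 u j → pvMk R j := by
  intro j h
  induction h with
  | refl => exact hmono u hu1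
  | @step j0 w hr hw hz ih =>
    obtain ⟨hjn, hjl, hjR⟩ := pvReach_props matrix n hWF vis1 u hun hul huR _ hr
    have hj0z : j0 ≠ 0 := pvReach_ne_zero matrix vis1 u huz h0 j0 hr
    have hmem : (j0 : Int) ∈ PySem.List.pyRange 1 N 1 := by
      rw [PySem.List.mem_pyRange_one]
      omega
    have hguard : pvGet R (j0 : Int) == 1 := by
      have hget : pvGet R (j0 : Int) = R.getD j0 1 := by
        have := pvGet_eq R (j0 : Int) (by omega) (by rw [hgood.1]; exact hjn)
        simpa using this
      have hjlt : j0 < R.length := by rw [hgood.1]; exact_mod_cast hjn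
      have hval : R.getD j0 1 = R[j0] := List.getD_eq_getElem _ _ hjlt
      have hmkj : pvMk R j0 := ih
      unfold pvMk at hmkj
      rcases hgood.2 R[j0] (List.getElem_mem hjlt) with h01 | h01
      · rw [hval, h01] at hmkj; omega
      · rw [hget, hval, h01]; rfl
    have hadj : w ∈ pvAdjI matrix (j0 : Int) := by
      rw [pvAdjI_eq matrix (j0 : Int) (by omega)]
      simpa using hw
    have hcon := hstab _ hmem hguard w hadj
    obtain ⟨hw0, hwn, hwl⟩ := hWF.2.2 j0 hjR w hw
    have hget : pvGet R w = R.getD w.toNat 1 :=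
      pvGet_eq R w hw0 (by rw [hgood.1]; omega)
    unfold pvMk
    intro hzz
    apply hcon
    rw [hget, hzz]
    rfl

theorem src_ok (matrix : List (List Int)) (n : Nat) (hWF : pvWF matrix n)
    (vis : List Int) (hg : pvGood n vis) (hCL : pvCL matrix n vis) (hINV : pvINV matrix n vis)
    (u : Int) (hu0 : 0 ≤ u) (hun : u < (n : Int)) (hul : u < (matrix.length : Int))
    (huR : u.toNat ∈ pvReachSet matrix (n : Int)) :
    pvHSRC matrix n (pvMark vis u) u.toNat := by
  have hutn : u.toNat < vis.length := by have := hg.1; omega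
  have hmkiff : ∀ j, pvMk (pvMark vis u) j ↔ (j = u.toNat ∨ pvMk vis j) :=
    pvMk_mark vis u hu0 hutn
  have hucast : ((u.toNat : Nat) : Int) = u := Int.toNat_of_nonneg hu0
  intro v hv0 hvn hv e he
  rw [pvAdjI_eq matrix (v : Int) (by omega)] at he
  simp only [Int.toNat_natCast] at he
  have hdisj : ∀ e' : Int, e' ∈ pvAdj matrix v → pvReach matrix (pvMark vis u) u.toNat v →
      pvMk (pvMark vis u) e'.toNat ∨ pvReach matrix (pvMark vis u) u.toNat e'.toNat := by
    intro e' he' hrv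
    by_cases hm : pvMk (pvMark vis u) e'.toNat
    · exact Or.inl hm
    · refine Or.inr (.step e' hrv he' ?_)
      unfold pvMk at hm
      omega
  rcases hv with hmk | hrch
  · rcases (hmkiff v).1 hmk with rfl | hmkv
    · -- v is the current child u
      obtain ⟨h1, h2, h3⟩ := hWF.2.2 u.toNat (by simpa using huR) e (by simpa using he)
      exact ⟨h1, h2, hdisj e (by simpa using he) .refl⟩
    · -- v was marked before this phase: its row is already fully marked
      obtain ⟨hvl, hvR⟩ := hINV v hv0 hvn hmkv
      obtain ⟨h1, h2, h3⟩ := hWF.2.2 v hvR e he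
      exact ⟨h1, h2, Or.inl ((hmkiff e.toNat).2 (Or.inr (hCL v hv0 hvn hmkv e he)))⟩
  · -- v was marked during this phase: it is reachable from u
    have hprops := pvReach_props matrix n hWF (pvMark vis u) u.toNat
      (by rw [hucast]; exact hun) (by rw [hucast]; exact hul) huR v hrch
    obtain ⟨h1, h2, h3⟩ := hWF.2.2 v hprops.2.2 e he
    exact ⟨h1, h2, hdisj e he hrch⟩

theorem phase_eq (matrix : List (List Int)) (N : Int) (n : Nat) (hN : N = (n : Int))
    (hWF : pvWF matrix n)
    (vis : List Int) (hg : pvGood n vis) (h0 : pvMk vis 0) (hCL : pvCL matrix n vis)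
    (hINV : pvINV matrix n vis)
    (u : Int) (hu0 : 0 ≤ u) (hun : u < (n : Int)) (hul : u < (matrix.length : Int))
    (huR : u.toNat ∈ pvReachSet matrix (n : Int)) (huz : u ≠ 0) :
    (whileA matrix (pvMark vis u) [u]).2 = sweepLoop matrix N (pvMark vis u) ∧
    (whileA matrix (pvMark vis u) [u]).1 =
      1 + PySem.List.count (pvMark vis u) 0 - PySem.List.count (sweepLoop matrix N (pvMark vis u)) 0 ∧
    pvGood n (sweepLoop matrix N (pvMark vis u)) ∧ pvMk (sweepLoop matrix N (pvMark vis u)) 0 ∧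
    pvCL matrix n (sweepLoop matrix N (pvMark vis u)) ∧
    pvINV matrix n (sweepLoop matrix N (pvMark vis u)) := by
  have hlen : vis.length = n := hg.1
  have hutn : u.toNat < vis.length := by rw [hlen]; omega
  have hg1 : pvGood n (pvMark vis u) := by
    rw [pvMark_eq vis u hu0]; exact pvGood_set n vis hg u.toNat
  have hmkiff := pvMk_mark vis u hu0 hutn
  have hu1 : pvMk (pvMark vis u) u.toNat := (hmkiff u.toNat).2 (Or.inl rfl)
  have h01 : pvMk (pvMark vis u) 0 := (hmkiff 0).2 (Or.inr h0)
  have hq : ∀ s ∈ [u], 0 ≤ s ∧ s < (n : Int) ∧ s < (matrix.length : Int) ∧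
      s.toNat ∈ pvReachSet matrix (n : Int) ∧ pvMk (pvMark vis u) s.toNat := by
    intro s hs
    rw [List.mem_singleton] at hs
    subst hs
    exact ⟨hu0, hun, hul, huR, hu1⟩
  obtain ⟨ag, amk, acnt⟩ := whileA_char matrix n hWF _ (pvMark vis u) [u] rfl hg1 hq
  have hsrc := src_ok matrix n hWF vis hg hCL hINV u hu0 hun hul huR
  obtain ⟨bg, bmono, bsound, bstab⟩ := sweepLoop_char matrix N n hN (pvMark vis u) u.toNat hsrc
    _ (pvMark vis u) rfl hg1 (fun j hj => hj) (fun j hj => Or.inl hj)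
  have hclosed := stable_closed matrix N n hN hWF (pvMark vis u)
    (sweepLoop matrix N (pvMark vis u)) u.toNat (by omega) (by omega) (by omega) huR
    bg bmono h01 hu1 bstab
  have hmkB : ∀ j, pvMk (sweepLoop matrix N (pvMark vis u)) j ↔
      pvMk (pvMark vis u) j ∨ pvReach matrix (pvMark vis u) u.toNat j :=
    fun j => ⟨bsound j, fun h => h.elim (bmono j) (hclosed j)⟩
  have hmkA : ∀ j, pvMk (whileA matrix (pvMark vis u) [u]).2 j ↔
      pvMk (pvMark vis u) j ∨ pvReach matrix (pvMark vis u) u.toNat j := by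
    intro j
    rw [amk j]
    simp
  have hvis : (whileA matrix (pvMark vis u) [u]).2 = sweepLoop matrix N (pvMark vis u) := by
    apply List.ext_getElem (by rw [ag.1, bg.1])
    intro k h1 h2
    have hmkk : pvMk (whileA matrix (pvMark vis u) [u]).2 k ↔
        pvMk (sweepLoop matrix N (pvMark vis u)) k := by rw [hmkA k, hmkB k]
    have ha := ag.2 _ (List.getElem_mem h1)
    have hb := bg.2 _ (List.getElem_mem h2)
    have hga : pvMk (whileA matrix (pvMark vis u) [u]).2 k ↔
        (whileA matrix (pvMark vis u) [u]).2[k] ≠ 0 := by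
      unfold pvMk; rw [List.getD_eq_getElem _ _ h1]
    have hgb : pvMk (sweepLoop matrix N (pvMark vis u)) k ↔
        (sweepLoop matrix N (pvMark vis u))[k] ≠ 0 := by
      unfold pvMk; rw [List.getD_eq_getElem _ _ h2]
    have hne : (whileA matrix (pvMark vis u) [u]).2[k] ≠ 0 ↔
        (sweepLoop matrix N (pvMark vis u))[k] ≠ 0 := by
      rw [← hga, ← hgb]; exact hmkk
    rcases ha with ha | ha <;> rcases hb with hb | hb
    · rw [ha, hb]
    · exfalso; rw [ha, hb] at hne; simp at hne
    · exfalso; rw [ha, hb] at hne; simp at hne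
    · rw [ha, hb]
  refine ⟨hvis, ?_, bg, bmono 0 h01, ?_, ?_⟩
  · rw [pvCount0, pvCount0, acnt, hvis]
    simp
    omega
  · -- pvCL is preserved: every marked non-root node's row is fully marked
    intro j hj0 hjn hmk e he
    rcases (hmkB j).1 hmk with hm1 | hrch
    · rcases (hmkiff j).1 hm1 with rfl | hmv
      · by_cases hme : pvMk (pvMark vis u) e.toNat
        · exact bmono _ hme
        · exact hclosed _ (.step e .refl he (by unfold pvMk at hme; omega))
      · exact bmono _ ((hmkiff e.toNat).2 (Or.inr (hCL j hj0 hjn hmv e he)))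
    · by_cases hme : pvMk (pvMark vis u) e.toNat
      · exact bmono _ hme
      · exact hclosed _ (.step e hrch he (by unfold pvMk at hme; omega))
  · -- pvINV is preserved: every marked non-root node is a reachable in-range node
    intro j hj0 hjn hmk
    rcases (hmkB j).1 hmk with hm1 | hrch
    · rcases (hmkiff j).1 hm1 with rfl | hmv
      · exact ⟨by omega, huR⟩
      · exact hINV j hj0 hjn hmv
    · have hp := pvReach_props matrix n hWF (pvMark vis u) u.toNat (by omega) (by omega) huR j hrch
      exact ⟨hp.2.1, hp.2.2⟩

theorem fold_eq (matrix : List (List Int)) (N : Int) (n : Nat) (hN : N = (n : Int))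
    (hWF : pvWF matrix n) :
    ∀ (row : List Int) (vis : List Int) (acc : Int),
      pvGood n vis → pvMk vis 0 → pvCL matrix n vis → pvINV matrix n vis →
      (∀ e ∈ row, 0 ≤ e ∧ e < (n : Int) ∧ e < (matrix.length : Int) ∧
        e.toNat ∈ pvReachSet matrix (n : Int) ∧ e ≠ 0) →
      row.foldl (fun (st : List Int × Int) u =>
          ((whileA matrix (pvMark st.1 u) [u]).2,
           max (whileA matrix (pvMark st.1 u) [u]).1 st.2)) (vis, acc) =
      row.foldl (fun (st : List Int × Int) u =>
          (sweepLoop matrix N (pvMark st.1 u),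
           max st.2 (1 + PySem.List.count (pvMark st.1 u) 0 -
             PySem.List.count (sweepLoop matrix N (pvMark st.1 u)) 0))) (vis, acc) := by
  intro row
  induction row with
  | nil => intros; rfl
  | cons i row ih =>
    intro vis acc hg h0 hCL hINV hb
    obtain ⟨hi0, hin, hil, hiR, hiz⟩ := hb i (List.mem_cons_self ..)
    obtain ⟨hvis, hcnt, hgood, h0', hCL', hINV'⟩ :=
      phase_eq matrix N n hN hWF vis hg h0 hCL hINV i hi0 hin hil hiR hiz
    simp only [List.foldl_cons]
    have hst : ((whileA matrix (pvMark vis i) [i]).2,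
        max (whileA matrix (pvMark vis i) [i]).1 acc) =
        (sweepLoop matrix N (pvMark vis i),
         max acc (1 + PySem.List.count (pvMark vis i) 0 -
           PySem.List.count (sweepLoop matrix N (pvMark vis i)) 0)) := by
      rw [hvis, hcnt, max_comm]
    rw [hst]
    exact ih _ _ hgood h0' hCL' hINV' (fun e he => hb e (List.mem_cons_of_mem _ he))

-- ===== VERDICT (by name: the statement is the Claim_ definition above) =====
theorem findMinTimeForTree_spec : Claim_equal_findMinTimeForTree := by
  intro matrix n hdom hpre
  unfold Spec_findMinTimeForTree
  obtain ⟨hn0, hnlen, hzero, hbnd⟩ := hpre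
  have hcast : ((n.toNat : Int)) = n := Int.toNat_of_nonneg (le_of_lt hn0)
  have hWF : pvWF matrix n.toNat := by
    refine ⟨by omega, by exact_mod_cast hnlen, fun j hj e he => ?_⟩
    rw [hcast] at hj
    obtain ⟨h1, h2, h3⟩ := hbnd j hj e he
    exact ⟨h1, by rw [hcast]; exact h2, h3⟩
  have hg0 : pvGood n.toNat (pvMark (List.replicate n.toNat 0) 0) := by
    rw [pvMark_eq _ _ le_rfl]
    refine ⟨by simp, fun x hx => ?_⟩
    rcases List.mem_or_eq_of_mem_set hx with h | h
    · left; exact List.eq_of_mem_replicate h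
    · right; exact h
  have h00 : pvMk (pvMark (List.replicate n.toNat 0) 0) 0 := by
    rw [pvMark_eq _ _ le_rfl]
    refine (pvMk_set _ 0 0 ?_).2 (Or.inl rfl)
    simp
    omega
  have hnomark : ∀ j : Nat, j ≠ 0 → ((j : Int)) < ((n.toNat : Int)) →
      ¬ pvMk (pvMark (List.replicate n.toNat 0) 0) j := by
    intro j hj0 hjn hmk
    unfold pvMk at hmk
    rw [pvMark_eq _ _ le_rfl] at hmk
    have hjlt : j < n.toNat := by exact_mod_cast hjn
    apply hmk
    rw [List.getD_eq_getElem _ _ (by simpa using hjlt)]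
    rw [List.getElem_set_ne (by omega)]
    simp
  have hCL0 : pvCL matrix n.toNat (pvMark (List.replicate n.toNat 0) 0) := by
    intro j hj0 hjn hmk
    exact absurd hmk (hnomark j hj0 hjn)
  have hINV0 : pvINV matrix n.toNat (pvMark (List.replicate n.toNat 0) 0) := by
    intro j hj0 hjn hmk
    exact absurd hmk (hnomark j hj0 hjn)
  have hlen0 : (0 : Int) < matrix.length := hnlen
  have hrow0Eq : (PySem.List.pyGet? matrix 0).getD [] = matrix.getD 0 [] := by
    rw [PySem.List.pyGet?_eq_some_getElem matrix le_rfl hlen0]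
    rw [List.getD_eq_getElem _ _ (by omega)]
    rfl
  have hrow0B : ∀ e ∈ (PySem.List.pyGet? matrix 0).getD [],
      0 ≤ e ∧ e < ((n.toNat : Int)) ∧ e < (matrix.length : Int) ∧
        e.toNat ∈ pvReachSet matrix ((n.toNat : Int)) ∧ e ≠ 0 := by
    rw [hrow0Eq]
    intro e he
    obtain ⟨h1, h2, h3⟩ :=
      hWF.2.2 0 (pvReachSet_zero_mem matrix ((n.toNat : Int))) e he
    refine ⟨h1, h2, h3, pvReachSet_closed matrix _ (pvReachSet_zero_mem matrix _) he h1 h2 h3, ?_⟩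
    intro hc
    rw [hc] at he
    exact hzero he
  have h := fold_eq matrix n n.toNat hcast.symm hWF ((PySem.List.pyGet? matrix 0).getD [])
    (pvMark (List.replicate n.toNat 0) 0) 0 hg0 h00 hCL0 hINV0 hrow0B
  unfold findMinTimeForTree findMinTimeForTree_alt
  simp only [pvAdjI]
  exact congrArg Prod.snd h
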